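-- pv_equiv track=rewrite | github.com/gustingonzalez/ircodecs | pforencoder.py | __find_optimal_b
-- ===== SOURCE A (Python) =====
-- POSSIBLES_B = [x for x in range(1, 33)]
--
-- MASKS = {x: (1 << x)-1 for x in range(0, 33)}
--
-- HEADER_SIZE = 32
--
-- def estimate_encoded_size(numbers, b):
--     '''Estima el tamaño de codificación para la lista y el b dados. Se presupone
--     un tamaño de excepción de 32 bits es decir, sin comprimir (lo que implica
--     que las excepciones sean altamente 'penalizadas'). Nota: el tamaño de
--     codificación es estimado, no final.
--
--     Args:
--         numbers (int list): números a codificar.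
--         b (int): cantidad de bits a utilizar por número.
--
--     Returns:
--         size (int): tamaño estimado de compresión.
--     '''
--     # Máximo número posible con b.
--     max_number = MASKS[b]
--
--     # Tamaño de header y slots.
--     size = HEADER_SIZE + len(numbers)*b
--
--     exception_count = 0
--     for i in range(0, len(numbers)):
--         if numbers[i] > max_number:
--             exception_count += 1
--
--     # Presunción de utilización de tamaño máximo (32 bits) por excepción.
--     size += exception_count*32
--     return size
--
-- def __find_optimal_b(numbers):
--     '''Halla el b óptimo (cantidad de bits a utilizar por slot) en base a la lista
--     de números pasada por parámetro.
--
--     Args: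
--         numbers (int list): números a codificar.
--
--     Returns:
--         b (int): cantidad de bits óptima a utilizar para cada elemento de la
--             lista de números a codificar.
--     '''
--     optimal_b = POSSIBLES_B[0]
--
--     # Estimación de tamaño de compresión en base a b.
--     optimal_size = estimate_encoded_size(numbers, optimal_b)
--
--     # Selección del mejor b.
--     for i in range(1, len(POSSIBLES_B)):
--         current_b = POSSIBLES_B[i]
--
--         # Tamaño para b actual.
--         current_size = estimate_encoded_size(numbers, current_b)
--
--         # ¿Es el b calculado mejor que el óptimo hasta el momento?
--         if current_size < optimal_size:
--             optimal_b = current_b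
--             optimal_size = current_size
--
--     return optimal_b
-- ===== SOURCE B (Python) =====
-- HEADER_SIZE = 32
--
-- def __find_optimal_b(numbers):
--     # One pass: count positive numbers and histogram their bit-lengths,
--     # then each candidate b is evaluated in O(1) via a running exception count.
--     n = len(numbers)
--     cnt = {}
--     pos = 0
--     for x in numbers:
--         if x > 0:
--             pos += 1
--             l = x.bit_length()
--             cnt[l] = cnt.get(l, 0) + 1
--     best_b = 1
--     exc = pos - cnt.get(1, 0)
--     best_size = HEADER_SIZE + n + 32 * exc
--     for b in range(2, 33):
--         exc -= cnt.get(b, 0)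
--         size = HEADER_SIZE + n * b + 32 * exc
--         if size < best_size:
--             best_b = b
--             best_size = size
--     return best_b
-- ===== Notes on version B (the rewrite author's own statement) =====
-- stated objective: faster
-- what changed: Instead of rescanning the whole list once per candidate bit-width (32 full passes calling estimate_encoded_size), B makes a single pass counting positive numbers and histogramming their bit-lengths in a dict, then scores each candidate b in O(1) by maintaining a running exception count (exceptions for b = exceptions for b-1 minus numbers of bit-length b).
import Mathlib
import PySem

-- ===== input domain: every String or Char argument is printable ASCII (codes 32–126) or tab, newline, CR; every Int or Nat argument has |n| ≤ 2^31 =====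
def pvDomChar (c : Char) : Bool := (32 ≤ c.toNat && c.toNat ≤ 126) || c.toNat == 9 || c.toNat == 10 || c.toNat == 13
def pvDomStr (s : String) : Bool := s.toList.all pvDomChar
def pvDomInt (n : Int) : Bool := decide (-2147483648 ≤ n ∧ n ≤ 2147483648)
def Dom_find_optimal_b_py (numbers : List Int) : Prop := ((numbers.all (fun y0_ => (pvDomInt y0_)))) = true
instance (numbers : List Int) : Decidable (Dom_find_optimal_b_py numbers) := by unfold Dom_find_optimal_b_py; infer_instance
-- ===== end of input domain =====

-- B replaces A's 32 full scans of the list (one estimate per candidate b) by a single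
-- pass building a counter of bit-lengths, then scores each candidate b in O(1) via a
-- running exception count (objective: faster, O(n + 32) work instead of O(32·n)).

-- ===== PORT A =====
def POSSIBLES_B : List Int := (PySem.List.pyRange 1 33 1).map (fun x => x)

def MASKS : PySem.Dict Int Int :=
  PySem.Dict.ofList ((PySem.List.pyRange 0 33 1).map (fun x => (x, (1 : Int) <<< x.toNat - 1)))

def HEADER_SIZE : Int := 32

def estimate_encoded_size (numbers : List Int) (b : Int) : Int :=
  let max_number := (MASKS.get? b).getD 0
  let size := HEADER_SIZE + PySem.List.len numbers * b
  let exception_count : Int :=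
    (PySem.List.pyRange 0 (PySem.List.len numbers) 1).foldl
      (fun ec i => if PySem.List.pyGetD numbers i 0 > max_number then ec + 1 else ec) 0
  size + exception_count * 32

def find_optimal_b_py (numbers : List Int) : Int :=
  let optimal_b := PySem.List.pyGetD POSSIBLES_B 0 0
  let optimal_size := estimate_encoded_size numbers optimal_b
  let r := (PySem.List.pyRange 1 (PySem.List.len POSSIBLES_B) 1).foldl
    (fun (st : Int × Int) i =>
      let current_b := PySem.List.pyGetD POSSIBLES_B i 0
      let current_size := estimate_encoded_size numbers current_b
      if current_size < st.2 then (current_b, current_size) else st)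
    (optimal_b, optimal_size)
  r.1

-- ===== PORT B =====
def find_optimal_b_py_alt (numbers : List Int) : Int :=
  let n := PySem.List.len numbers
  let st := numbers.foldl
    (fun (st : PySem.Dict Int Int × Int) x =>
      if x > 0 then
        (st.1.insert ((PySem.Int.bitLength x : Int)) (st.1.getD ((PySem.Int.bitLength x : Int)) 0 + 1), st.2 + 1)
      else st)
    (PySem.Dict.empty, 0)
  let cnt := st.1
  let pos := st.2
  let exc0 := pos - cnt.getD 1 0
  let best_size0 := 32 + n + 32 * exc0
  let r := (PySem.List.pyRange 2 33 1).foldl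
    (fun (t : Int × Int × Int) b =>
      let exc := t.2.2 - cnt.getD b 0
      let size := 32 + n * b + 32 * exc
      if size < t.2.1 then (b, size, exc) else (t.1, t.2.1, exc))
    (1, best_size0, exc0)
  r.1

-- ===== PRECONDITION & SPEC =====
def Spec_find_optimal_b_py (numbers : List Int) (out : Int) : Prop := out = find_optimal_b_py_alt numbers
instance (numbers : List Int) (out : Int) : Decidable (Spec_find_optimal_b_py numbers out) := by unfold Spec_find_optimal_b_py; infer_instance

-- ===== CLAIM (what is proved, stated in full; the proofs are below) =====
def Claim_equal_find_optimal_b_py : Prop := ∀ (numbers : List Int), Dom_find_optimal_b_py numbers → Spec_find_optimal_b_py numbers (find_optimal_b_py numbers)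

-- ===== LEMMAS AND PROOFS =====

-- bit-lengths of the positive elements (what B's dict counts)
def pvLbl (numbers : List Int) : List Int :=
  (numbers.filter (fun x => decide (0 < x))).map (fun x => (PySem.Int.bitLength x : Int))

-- number of exceptions for bit width k (what A's inner loop counts)
def pvExc (numbers : List Int) (k : Nat) : Int :=
  (numbers.countP (fun x => decide ((1 : Int) <<< k - 1 < x)) : Int)

-- estimated size as a function of the candidate width b
def pvG (numbers : List Int) (b : Int) : Int :=
  32 + PySem.List.len numbers * b + 32 * pvExc numbers b.toNat

-- per-element trichotomy: crossing from width k-1 to width k loses exactly the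
-- positive elements of bit-length k
lemma pv_elem (x : Int) (k : Nat) (hk : 1 ≤ k) :
    ((1 : Int) <<< (k-1) - 1 < x ↔ ((1 : Int) <<< k - 1 < x ∨ (0 < x ∧ PySem.Int.bitLength x = k)))
    ∧ ¬((1 : Int) <<< k - 1 < x ∧ 0 < x ∧ PySem.Int.bitLength x = k) := by
  have hs : ∀ m : Nat, (1 : Int) <<< m = 2 ^ m := fun m => by rw [Int.shiftLeft_eq]; ring
  rw [hs, hs]
  by_cases hx : 0 < x
  · have hm : ((x.natAbs : Int)) = x := Int.natAbs_of_nonneg hx.le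
    have hb1 : (x.natAbs : Int) < 2 ^ PySem.Int.bitLength x := by
      exact_mod_cast Nat.cast_lt.mpr (PySem.Int.lt_two_pow_bitLength x)
    have hb2 : (2 : Int) ^ (PySem.Int.bitLength x - 1) ≤ x.natAbs := by
      exact_mod_cast Nat.cast_le.mpr (PySem.Int.two_pow_bitLength_le x (by omega))
    set B := PySem.Int.bitLength x with hB
    constructor
    · constructor
      · intro h
        by_cases h2 : 2 ^ k - 1 < x
        · exact Or.inl h2
        · refine Or.inr ⟨hx, ?_⟩
          push Not at h2
          have hlo : (2 : Int) ^ (k-1) ≤ x := by linarith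
          have hBle : B ≤ k := by
            by_contra hc
            push Not at hc
            have : (2 : Int) ^ k ≤ 2 ^ (B - 1) :=
              pow_le_pow_right₀ (by norm_num) (by omega)
            linarith [hm ▸ hb2]
          have hBge : k ≤ B := by
            by_contra hc
            push Not at hc
            have : (2 : Int) ^ (k - 1) < 2 ^ (k - 1) := by
              calc (2 : Int) ^ (k-1) ≤ x := hlo
                _ < 2 ^ B := hm ▸ hb1
                _ ≤ 2 ^ (k-1) := pow_le_pow_right₀ (by norm_num) (by omega)
            linarith
          omega
      · rintro (h | ⟨-, hbl⟩)
        · have : (2 : Int) ^ (k-1) ≤ 2 ^ k := pow_le_pow_right₀ (by norm_num) (by omega)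
          linarith
        · have : (2 : Int) ^ (k-1) ≤ x := by rw [← hbl] at *; linarith [hm ▸ hb2]
          linarith
    · rintro ⟨h, -, hbl⟩
      rw [hbl] at hb1
      linarith [hm ▸ hb1]
  · have hx' : x ≤ 0 := not_lt.mp hx
    have h1 : (1 : Int) ≤ 2 ^ (k-1) := one_le_pow₀ (by norm_num)
    have h2 : (1 : Int) ≤ 2 ^ k := one_le_pow₀ (by norm_num)
    refine ⟨⟨fun h => absurd h (by linarith), ?_⟩, ?_⟩
    · rintro (h | ⟨h0, -⟩)
      · linarith
      · exact absurd h0 hx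
    · rintro ⟨-, h0, -⟩; exact hx h0

-- the exception count for width k is the one for width k-1 minus the number of
-- positive elements of bit-length exactly k
lemma pv_exc_step (numbers : List Int) (k : Nat) (hk : 1 ≤ k) :
    pvExc numbers (k-1) - (pvLbl numbers).count (k : Int) = pvExc numbers k := by
  induction numbers with
  | nil => simp [pvExc, pvLbl]
  | cons x ns ih =>
    have he := pv_elem x k hk
    simp only [pvExc, pvLbl, List.countP_cons, List.filter_cons, decide_eq_true_eq] at *
    by_cases hx : 0 < x
    · rw [if_pos hx]
      simp only [List.map_cons, List.count_cons]
      by_cases hbl : PySem.Int.bitLength x = k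
      · rw [if_pos (he.1.mpr (Or.inr ⟨hx, hbl⟩)),
            if_neg (fun hc => he.2 ⟨hc, hx, hbl⟩),
            if_pos (by simp [hbl])]
        push_cast; omega
      · have hiff : ((1 : Int) <<< (k-1) - 1 < x) ↔ ((1 : Int) <<< k - 1 < x) :=
          ⟨fun h => (he.1.mp h).resolve_right (fun hh => hbl hh.2), fun h => he.1.mpr (Or.inl h)⟩
        rw [if_neg (show ¬ ((PySem.Int.bitLength x : Int) == (k : Int)) = true by
              simp; exact_mod_cast hbl)]
        by_cases hp : (1 : Int) <<< k - 1 < x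
        · rw [if_pos (hiff.mpr hp), if_pos hp]; push_cast; omega
        · rw [if_neg (fun h => hp (hiff.mp h)), if_neg hp]; push_cast; omega
    · rw [if_neg hx]
      have h1 : (1 : Int) ≤ (1 : Int) <<< k := by
        rw [Int.shiftLeft_eq]; simpa using one_le_pow₀ (by norm_num : (1:Int) ≤ 2)
      have hp : ¬ ((1 : Int) <<< k - 1 < x) := fun hc => hx (by omega)
      rw [if_neg (fun h => hp ((⟨fun h' => ((he.1.mp h').resolve_right (fun hh => hx hh.1)), fun h' => he.1.mpr (Or.inl h')⟩ : _ ↔ _).mp h)), if_neg hp]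
      push_cast; omega

-- B's first pass computes the bit-length counter (as a fold) and the count of positives
lemma pv_pass_eq (numbers : List Int) : ∀ (d : PySem.Dict Int Int) (p : Int),
    numbers.foldl
      (fun (st : PySem.Dict Int Int × Int) x =>
        if x > 0 then
          (st.1.insert ((PySem.Int.bitLength x : Int)) (st.1.getD ((PySem.Int.bitLength x : Int)) 0 + 1), st.2 + 1)
        else st)
      (d, p)
    = ((pvLbl numbers).foldl (fun d x => d.insert x (d.getD x 0 + 1)) d,
       p + ((pvLbl numbers).length : Int)) := by
  induction numbers with
  | nil => intro d p; simp [pvLbl]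
  | cons x ns ih =>
    intro d p
    simp only [pvLbl, List.filter_cons, List.foldl_cons]
    by_cases hx : 0 < x
    · rw [if_pos hx, if_pos (decide_eq_true hx)]
      rw [ih]
      simp only [pvLbl, List.map_cons, List.foldl_cons, List.length_cons]
      refine Prod.ext rfl ?_
      push_cast; ring
    · rw [if_neg hx, if_neg (by simpa using hx : ¬ (decide (0 < x) = true))]
      exact ih d p

-- the two selection loops agree, carrying the running exception count as invariant
lemma pv_loop_eq (numbers : List Int) : ∀ (k : Nat) (a : Int), a = 33 - (k : Int) → 2 ≤ a →
    ∀ (ob os : Int),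
    (PySem.List.pyRange a 33 1).foldl
      (fun (t : Int × Int × Int) b =>
        let exc := t.2.2 - (pvLbl numbers).count b
        let size := 32 + PySem.List.len numbers * b + 32 * exc
        if size < t.2.1 then (b, size, exc) else (t.1, t.2.1, exc))
      (ob, os, pvExc numbers (a-1).toNat)
    = (((PySem.List.pyRange a 33 1).foldl
          (fun (st : Int × Int) b => if pvG numbers b < st.2 then (b, pvG numbers b) else st)
          (ob, os)).1,
       ((PySem.List.pyRange a 33 1).foldl
          (fun (st : Int × Int) b => if pvG numbers b < st.2 then (b, pvG numbers b) else st)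
          (ob, os)).2,
       pvExc numbers 32) := by
  intro k
  induction k with
  | zero =>
    intro a ha h2 ob os
    have : a = 33 := by omega
    subst this
    rw [PySem.List.pyRange_one_eq_nil (by omega),
        show ((33:Int)-1).toNat = 32 from rfl]
    norm_num
  | succ k ih =>
    intro a ha h2 ob os
    have ha32 : a ≤ 32 := by omega
    rw [PySem.List.pyRange_one_cons (by omega)]
    simp only [List.foldl_cons]
    have hstep : pvExc numbers (a-1).toNat - (pvLbl numbers).count a = pvExc numbers a.toNat := by
      have h := pv_exc_step numbers a.toNat (by omega)
      have h1 : (a.toNat - 1) = (a-1).toNat := by omega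
      have h2 : ((a.toNat : Int)) = a := by omega
      rw [h1, h2] at h
      exact h
    simp only [hstep, pvG]
    split_ifs with hc
    · have h := ih (a+1) (by omega) (by omega) a (32 + PySem.List.len numbers * a + 32 * pvExc numbers a.toNat)
      rw [show ((a+1)-1).toNat = a.toNat by omega] at h
      exact h
    · have h := ih (a+1) (by omega) (by omega) ob os
      rw [show ((a+1)-1).toNat = a.toNat by omega] at h
      exact h

lemma pv_mask_eq (b : Int) (h1 : 1 ≤ b) (h2 : b ≤ 32) :
    (MASKS.get? b).getD 0 = (1 : Int) <<< b.toNat - 1 := by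
  interval_cases b <;> rfl

lemma pv_estimate_eq (numbers : List Int) (b : Int) (h1 : 1 ≤ b) (h2 : b ≤ 32) :
    estimate_encoded_size numbers b = pvG numbers b := by
  unfold estimate_encoded_size
  simp only [pv_mask_eq b h1 h2]
  show HEADER_SIZE + PySem.List.len numbers * b +
      ((PySem.List.pyRange 0 (PySem.List.len numbers) 1).foldl
        (fun ec i => if PySem.List.pyGetD numbers i 0 > (1 : Int) <<< b.toNat - 1 then ec + 1 else ec) 0) * 32
      = pvG numbers b
  rw [PySem.List.foldl_pyRange_zero_pyGetD numbers 0
        (fun ec x => if x > (1 : Int) <<< b.toNat - 1 then ec + 1 else ec) 0]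
  rw [PySem.List.foldl_ite_add_one]
  unfold pvG pvExc HEADER_SIZE
  ring

-- A's selection loop, rewritten from index space to the candidate widths 2..32
lemma pv_a_loop (numbers : List Int) :
    (PySem.List.pyRange 1 (PySem.List.len POSSIBLES_B) 1).foldl
      (fun (st : Int × Int) i =>
        let current_b := PySem.List.pyGetD POSSIBLES_B i 0
        let current_size := estimate_encoded_size numbers current_b
        if current_size < st.2 then (current_b, current_size) else st)
      (1, estimate_encoded_size numbers 1)
    = (PySem.List.pyRange 2 33 1).foldl
        (fun (st : Int × Int) b => if pvG numbers b < st.2 then (b, pvG numbers b) else st)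
        (1, pvG numbers 1) := by
  have hlen : PySem.List.len POSSIBLES_B = 32 := rfl
  rw [hlen, pv_estimate_eq numbers 1 (by norm_num) (by norm_num)]
  have hbody : ∀ (st : Int × Int) (i : Int), i ∈ PySem.List.pyRange 1 32 1 →
      (fun (st : Int × Int) i =>
        let current_b := PySem.List.pyGetD POSSIBLES_B i 0
        let current_size := estimate_encoded_size numbers current_b
        if current_size < st.2 then (current_b, current_size) else st) st i
      = (fun (st : Int × Int) i =>
          if pvG numbers (i+1) < st.2 then (i+1, pvG numbers (i+1)) else st) st i := by
    intro st i hi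
    have hmem := (PySem.List.mem_pyRange_one).mp hi
    have hidx : PySem.List.pyGetD POSSIBLES_B i 0 = i + 1 := by
      show PySem.List.pyGetD ((PySem.List.pyRange 1 33 1).map (fun x => x)) i 0 = i + 1
      rw [List.map_id']
      rw [PySem.List.pyGetD_eq_getElem (PySem.List.pyRange 1 33 1) 0 (by omega)
            (by rw [PySem.List.length_pyRange_one]; omega)]
      rw [PySem.List.getElem_pyRange_one]
      omega
    simp only [hidx, pv_estimate_eq numbers (i+1) (by omega) (by omega)]
  rw [PySem.List.foldl_congr_mem _ _ _ _ hbody]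
  rw [show PySem.List.pyRange 2 33 1 = (PySem.List.pyRange 1 32 1).map (fun i => i + 1) by
        rw [PySem.List.pyRange_one, PySem.List.pyRange_one, List.map_map]
        norm_num
        omega]
  rw [List.foldl_map]

lemma pv_main (numbers : List Int) : find_optimal_b_py numbers = find_optimal_b_py_alt numbers := by
  have hpos : ((pvLbl numbers).length : Int) = pvExc numbers 0 := by
    unfold pvLbl pvExc
    rw [List.length_map, ← List.countP_eq_length_filter]
    congr 1
  have hexc0 : pvExc numbers 0 - ((pvLbl numbers).count (1 : Int) : Int) = pvExc numbers 1 := by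
    simpa using pv_exc_step numbers 1 (le_refl 1)
  have halt : find_optimal_b_py_alt numbers =
      ((PySem.List.pyRange 2 33 1).foldl
        (fun (t : Int × Int × Int) b =>
          let exc := t.2.2 - ((pvLbl numbers).count b : Int)
          let size := 32 + PySem.List.len numbers * b + 32 * exc
          if size < t.2.1 then (b, size, exc) else (t.1, t.2.1, exc))
        (1, 32 + PySem.List.len numbers + 32 * pvExc numbers 1, pvExc numbers 1)).1 := by
    unfold find_optimal_b_py_alt
    rw [pv_pass_eq numbers PySem.Dict.empty 0,
        PySem.Dict.foldl_insert_getD_add_one_eq_counter]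
    simp only [PySem.Dict.getD_counter, zero_add]
    rw [hpos, hexc0]
  have ha : find_optimal_b_py numbers =
      ((PySem.List.pyRange 2 33 1).foldl
        (fun (st : Int × Int) b => if pvG numbers b < st.2 then (b, pvG numbers b) else st)
        (1, pvG numbers 1)).1 := by
    unfold find_optimal_b_py
    show ((PySem.List.pyRange 1 (PySem.List.len POSSIBLES_B) 1).foldl
      (fun (st : Int × Int) i =>
        let current_b := PySem.List.pyGetD POSSIBLES_B i 0
        let current_size := estimate_encoded_size numbers current_b
        if current_size < st.2 then (current_b, current_size) else st)
      (1, estimate_encoded_size numbers 1)).1 = _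
    rw [pv_a_loop numbers]
  rw [ha, halt]
  have hinit : (32 : Int) + PySem.List.len numbers + 32 * pvExc numbers 1 = pvG numbers 1 := by
    unfold pvG
    rw [show ((1:Int)).toNat = 1 from rfl]
    ring
  rw [hinit]
  have h := pv_loop_eq numbers 31 2 (by norm_num) (by norm_num) 1 (pvG numbers 1)
  rw [show ((2:Int)-1).toNat = 1 from rfl] at h
  rw [h]

-- ===== VERDICT (by name: the statement is the Claim_ definition above) =====
theorem find_optimal_b_py_spec : Claim_equal_find_optimal_b_py := by
  intro numbers _
  unfold Spec_find_optimal_b_py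
  exact pv_main numbers
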